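-- pv_equiv track=rewrite | github.com/CasualCodes/next-gen-qa | django_ngq/ngq_app/utils.py | get_divide_indices
-- ===== SOURCE A (Python) =====
-- def get_divide_indices(divided_scraped_data):
--     divided_scraped_data
--     indices = []
--
--     i = 0
--     for data_type in divided_scraped_data:
--         indices.append(i)
--         for data in data_type:
--             i+=1
--
--     return indices
-- ===== SOURCE B (Python) =====
-- def get_divide_indices(divided_scraped_data):
--     # Build the start indices BACK-TO-FRONT: begin at the total element count,
--     # walk the groups in reverse subtracting each group's length, then reverse.
--     out = []
--     i = sum(len(g) for g in divided_scraped_data)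
--     for g in reversed(divided_scraped_data):
--         i -= len(g)
--         out.append(i)
--     out.reverse()
--     return out
-- ===== Notes on version B (the rewrite author's own statement) =====
-- stated objective: alternative
-- what changed: Instead of A's forward element-by-element counting loop, B computes the total length once and builds the index list back-to-front, walking the groups in reverse and subtracting each group's length, then reversing; it takes one O(1) len per group instead of iterating the elements.
import Mathlib
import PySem

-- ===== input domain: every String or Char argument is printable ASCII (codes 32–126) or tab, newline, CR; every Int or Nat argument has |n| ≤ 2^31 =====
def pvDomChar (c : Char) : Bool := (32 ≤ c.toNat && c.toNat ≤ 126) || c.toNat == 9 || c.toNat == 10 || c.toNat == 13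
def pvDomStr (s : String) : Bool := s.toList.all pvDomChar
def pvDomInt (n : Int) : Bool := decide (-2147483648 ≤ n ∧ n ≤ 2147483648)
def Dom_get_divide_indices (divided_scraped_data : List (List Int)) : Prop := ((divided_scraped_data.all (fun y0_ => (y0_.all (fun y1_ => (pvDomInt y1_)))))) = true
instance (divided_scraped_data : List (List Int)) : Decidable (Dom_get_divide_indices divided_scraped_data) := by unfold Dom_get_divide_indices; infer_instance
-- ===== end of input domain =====

-- B builds the index list back-to-front from the total length (one len per group, groups walked in reverse) instead of A's forward per-element counting (objective: alternative).
-- ===== PORT A =====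
-- A: appends the running counter i for each group, incrementing i once per element.
def get_divide_indices (divided_scraped_data : List (List Int)) : List Int :=
  (divided_scraped_data.foldl
    (fun (st : List Int × Int) data_type =>
      (st.1 ++ [st.2], data_type.foldl (fun i _ => i + 1) st.2))
    ([], 0)).1

-- ===== PORT B =====
-- B: start from the total element count, walk groups in reverse subtracting lengths, then reverse.
def get_divide_indices_alt (divided_scraped_data : List (List Int)) : List Int :=
  let total : Int := (divided_scraped_data.map (fun g => (g.length : Int))).sum
  ((divided_scraped_data.reverse.foldl
      (fun (st : List Int × Int) g =>
        (st.1 ++ [st.2 - g.length], st.2 - g.length))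
      ([], total)).1).reverse

-- ===== PRECONDITION & SPEC =====
def Spec_get_divide_indices (divided_scraped_data : List (List Int)) (out : List Int) : Prop := out = get_divide_indices_alt divided_scraped_data
instance (divided_scraped_data : List (List Int)) (out : List Int) : Decidable (Spec_get_divide_indices divided_scraped_data out) := by unfold Spec_get_divide_indices; infer_instance

-- ===== CLAIM =====
def Claim_equal_get_divide_indices : Prop := ∀ (divided_scraped_data : List (List Int)), Dom_get_divide_indices divided_scraped_data → Spec_get_divide_indices divided_scraped_data (get_divide_indices divided_scraped_data)

-- ===== LEMMAS AND PROOFS =====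

-- reference spec: start index of each group, starting from i
def pvIdx (l : List (List Int)) (i : Int) : List Int :=
  match l with
  | [] => []
  | g :: t => i :: pvIdx t (i + g.length)

-- reference for B's reversed walk: successive values i - len g1, i - len g1 - len g2, …
def pvRevIdx (l : List (List Int)) (i : Int) : List Int :=
  match l with
  | [] => []
  | g :: t => (i - g.length) :: pvRevIdx t (i - g.length)

def pvT (l : List (List Int)) : Int := (l.map (fun g => (g.length : Int))).sum

theorem count_foldl (g : List Int) (i : Int) :
    g.foldl (fun i _ => i + 1) i = i + g.length := by
  induction g generalizing i with
  | nil => simp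
  | cons x t ih => simp [List.foldl, ih]; ring

theorem portA_eq (l : List (List Int)) (acc : List Int) (i : Int) :
    (l.foldl (fun (st : List Int × Int) data_type =>
        (st.1 ++ [st.2], data_type.foldl (fun j _ => j + 1) st.2)) (acc, i)).1
      = acc ++ pvIdx l i := by
  induction l generalizing acc i with
  | nil => simp [pvIdx]
  | cons g t ih =>
    rw [List.foldl_cons, ih]
    simp [pvIdx, count_foldl]

theorem portB_fold (l : List (List Int)) (acc : List Int) (i : Int) :
    (l.foldl (fun (st : List Int × Int) g =>
        (st.1 ++ [st.2 - g.length], st.2 - g.length)) (acc, i)).1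
      = acc ++ pvRevIdx l i := by
  induction l generalizing acc i with
  | nil => simp [pvRevIdx]
  | cons g t ih =>
    rw [List.foldl_cons, ih]
    simp [pvRevIdx]

theorem pvRevIdx_append (m n : List (List Int)) (i : Int) :
    pvRevIdx (m ++ n) i = pvRevIdx m i ++ pvRevIdx n (i - pvT m) := by
  induction m generalizing i with
  | nil => simp [pvRevIdx, pvT]
  | cons g t ih =>
    simp only [List.cons_append, pvRevIdx, ih]
    have : i - (g.length : Int) - pvT t = i - pvT (g :: t) := by
      simp [pvT]; ring
    rw [this]

theorem pvT_reverse (l : List (List Int)) : pvT l.reverse = pvT l := by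
  simp [pvT]

theorem rev_eq_idx (l : List (List Int)) (s : Int) :
    (pvRevIdx l.reverse (s + pvT l)).reverse = pvIdx l s := by
  induction l generalizing s with
  | nil => simp [pvRevIdx, pvIdx]
  | cons g t ih =>
    rw [List.reverse_cons, pvRevIdx_append]
    have h1 : pvT (g :: t) = (g.length : Int) + pvT t := by simp [pvT]
    have h2 : s + pvT (g :: t) - pvT t.reverse = s + g.length := by
      rw [pvT_reverse, h1]; ring
    have h3 : s + pvT (g :: t) = (s + g.length) + pvT t := by rw [h1]; ring
    rw [h2, h3]
    simp only [pvRevIdx, List.reverse_append, List.reverse_cons, List.reverse_nil,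
      List.nil_append, List.cons_append, ih (s + g.length)]
    simp [pvIdx]

-- ===== VERDICT =====
theorem get_divide_indices_spec : Claim_equal_get_divide_indices := by
  intro l _
  unfold Spec_get_divide_indices get_divide_indices get_divide_indices_alt
  rw [portA_eq]
  show [] ++ pvIdx l 0 = _
  simp only []
  rw [portB_fold]
  simp only [List.nil_append]
  have := rev_eq_idx l 0
  simpa [pvT] using this.symm
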